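-- pv_equiv track=rewrite | github.com/huguesrichard/AOC24 | Puzzle-day4.py | diagonal_indexes
-- ===== SOURCE A (Python) =====
-- def diagonal_indexes(start: tuple[int,int], nrow: int, ncol:int)->list[tuple[int,int]]:
--     """
--     Given a rectangle with nrow rows adn ncol cols ,and starting from position
--     start = (i,j), returns the diagonal values obtained by going down on the
--     right
--     """
--     istart, jstart = start
--     if istart >= nrow or jstart >= ncol: return None
--     lpos = []
--     while istart < nrow and jstart < ncol:
--         lpos.append((istart, jstart))
--         istart += 1
--         jstart += 1
--     return lpos
-- ===== SOURCE B (Python) =====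
-- def _seg(i, j, k):
--     # cells (i,j), (i+1,j+1), ..., (i+k-1,j+k-1), built by divide and conquer (k >= 1)
--     if k == 1:
--         return [(i, j)]
--     h = k // 2
--     return _seg(i, j, h) + _seg(i + h, j + h, k - h)
--
-- def diagonal_indexes(start: tuple[int, int], nrow: int, ncol: int) -> list[tuple[int, int]]:
--     i, j = start
--     if i >= nrow or j >= ncol:
--         return None
--     return _seg(i, j, min(nrow - i, ncol - j))
-- ===== Notes on version B (the rewrite author's own statement) =====
-- stated objective: alternative
-- what changed: Replaces the linear while loop that tests both bounds and appends one cell per step by a divide-and-conquer construction: the diagonal length is fixed up front and the segment of cells is built by recursively splitting it in half and concatenating the two halves.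
import Mathlib
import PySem

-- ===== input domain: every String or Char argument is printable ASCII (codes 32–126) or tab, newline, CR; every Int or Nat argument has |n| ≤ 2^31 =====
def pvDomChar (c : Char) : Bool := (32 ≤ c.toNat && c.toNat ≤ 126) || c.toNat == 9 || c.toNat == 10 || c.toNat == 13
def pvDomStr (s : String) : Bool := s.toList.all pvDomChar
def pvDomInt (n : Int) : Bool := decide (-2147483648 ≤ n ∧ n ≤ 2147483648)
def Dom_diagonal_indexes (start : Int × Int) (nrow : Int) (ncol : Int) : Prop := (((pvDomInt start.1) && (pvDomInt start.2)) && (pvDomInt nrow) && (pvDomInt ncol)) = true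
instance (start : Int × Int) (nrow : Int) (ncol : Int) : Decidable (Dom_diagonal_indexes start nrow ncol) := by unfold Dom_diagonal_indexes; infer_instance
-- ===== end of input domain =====

-- B replaces A's per-step dual-bound while loop by a divide-and-conquer build of the diagonal segment (alternative algorithm; equivalence of return values proved).


-- ===== PORT A =====
-- the while loop: append (i, j) while both bounds hold, stepping i and j by 1
def diagLoopA (nrow ncol : Int) (i j : Int) (acc : List (Int × Int)) : List (Int × Int) :=
  if i < nrow ∧ j < ncol then
    diagLoopA nrow ncol (i + 1) (j + 1) (acc ++ [(i, j)])
  else acc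
termination_by (nrow - i).toNat
decreasing_by omega

def diagonal_indexes (start : Int × Int) (nrow : Int) (ncol : Int) : Option (List (Int × Int)) :=
  let istart := start.1
  let jstart := start.2
  if istart ≥ nrow ∨ jstart ≥ ncol then none
  else some (diagLoopA nrow ncol istart jstart [])

-- ===== PORT B =====
-- _seg: cells (i,j) … (i+k-1,j+k-1) by divide and conquer; the k = 0 branch is a
-- totality guard only (Python never calls _seg with k < 1); k / 2 on Nat is exact
-- for Python's k // 2 since k ≥ 0
def diagSeg (i j : Int) (k : Nat) : List (Int × Int) :=
  if k ≤ 1 then (if k = 0 then [] else [(i, j)])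
  else
    let h := k / 2
    diagSeg i j h ++ diagSeg (i + h) (j + h) (k - h)
termination_by k
decreasing_by all_goals omega

def diagonal_indexes_alt (start : Int × Int) (nrow : Int) (ncol : Int) : Option (List (Int × Int)) :=
  let i := start.1
  let j := start.2
  if i ≥ nrow ∨ j ≥ ncol then none
  else some (diagSeg i j (min (nrow - i) (ncol - j)).toNat)

-- ===== PRECONDITION & SPEC =====
def Spec_diagonal_indexes (start : Int × Int) (nrow : Int) (ncol : Int) (out : Option (List (Int × Int))) : Prop := out = diagonal_indexes_alt start nrow ncol
instance (start : Int × Int) (nrow : Int) (ncol : Int) (out : Option (List (Int × Int))) : Decidable (Spec_diagonal_indexes start nrow ncol out) := by unfold Spec_diagonal_indexes; infer_instance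

-- ===== CLAIM (what is proved, stated in full; the proofs are below) =====
def Claim_equal_diagonal_indexes : Prop := ∀ (start : Int × Int) (nrow : Int) (ncol : Int), Dom_diagonal_indexes start nrow ncol → Spec_diagonal_indexes start nrow ncol (diagonal_indexes start nrow ncol)

-- ===== LEMMAS AND PROOFS =====
-- both sides equal the range map (i+d, j+d), d < k
theorem diagSeg_eq (k : Nat) (i j : Int) :
    diagSeg i j k = (List.range k).map (fun d : Nat => (i + (d:Int), j + (d:Int))) := by
  by_cases h1 : k ≤ 1
  · rw [diagSeg, if_pos h1]
    interval_cases k <;> simp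
  · rw [diagSeg, if_neg h1]
    have hk : k = k / 2 + (k - k / 2) := by omega
    show diagSeg i j (k / 2) ++ diagSeg (i + (↑(k / 2):Int)) (j + (↑(k / 2):Int)) (k - k / 2) = _
    rw [diagSeg_eq, diagSeg_eq]
    conv_rhs => rw [hk]
    rw [List.range_add, List.map_append, List.map_map]
    refine congrArg₂ (· ++ ·) rfl ?_
    refine List.map_congr_left ?_
    intro d _
    simp only [Function.comp_apply, Prod.ext_iff]
    push_cast
    omega
termination_by k
decreasing_by all_goals omega

theorem diagLoopA_eq (nrow ncol : Int) (i j : Int) (acc : List (Int × Int)) :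
    diagLoopA nrow ncol i j acc =
      acc ++ (List.range (min (nrow - i) (ncol - j)).toNat).map (fun d : Nat => (i + (d:Int), j + (d:Int))) := by
  by_cases h : i < nrow ∧ j < ncol
  · rw [diagLoopA, if_pos h, diagLoopA_eq]
    have hk : (min (nrow - i) (ncol - j)).toNat
        = (min (nrow - (i + 1)) (ncol - (j + 1))).toNat + 1 := by omega
    rw [hk, List.range_succ_eq_map, List.map_cons, List.map_map, List.append_assoc,
      List.singleton_append]
    refine congrArg (acc ++ ·) ?_
    refine congrArg₂ List.cons (by simp) ?_
    refine List.map_congr_left ?_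
    intro d _
    simp only [Function.comp_apply, Nat.succ_eq_add_one, Prod.ext_iff]
    push_cast
    omega
  · rw [diagLoopA, if_neg h]
    have : (min (nrow - i) (ncol - j)).toNat = 0 := by omega
    simp [this]
termination_by (nrow - i).toNat
decreasing_by omega

-- ===== VERDICT (by name: the statement is the Claim_ definition above) =====
theorem diagonal_indexes_spec : Claim_equal_diagonal_indexes := by
  intro start nrow ncol _
  unfold Spec_diagonal_indexes diagonal_indexes diagonal_indexes_alt
  by_cases h : start.1 ≥ nrow ∨ start.2 ≥ ncol
  · simp [h]
  · simp only [h, if_false]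
    rw [diagLoopA_eq, diagSeg_eq]
    simp
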